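-- pv_equiv track=rewrite | github.com/Katy-Bejar/Cifrado-Sim-trico-Cl-sico | Amsco.py | dividir_bloques_amsco
-- ===== SOURCE A (Python) =====
-- def dividir_bloques_amsco(mensaje):
--     """Divide el mensaje en bloques de 1 o 2 caracteres de forma alternada."""
--     bloques = []
--     alterna = True
--     i = 0
--     while i < len(mensaje):
--         tamaño = 1 if alterna else 2
--         bloques.append(mensaje[i:i+tamaño])
--         i += tamaño
--         alterna = not alterna
--     return bloques
-- ===== SOURCE B (Python) =====
-- def dividir_bloques_amsco(mensaje):
--     """Divide el mensaje en bloques de 1 o 2 caracteres de forma alternada."""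
--     n = len(mensaje)
--     num_bloques = (2 * n + 2) // 3
--     return [mensaje[3 * (j // 2) + j % 2 : 3 * (j // 2) + j % 2 + 1 + j % 2]
--             for j in range(num_bloques)]
-- ===== Notes on version B (the rewrite author's own statement) =====
-- stated objective: alternative
-- what changed: Replaces A's sequential while-loop with a toggle flag by a closed-form index map: the number of blocks is computed as (2n+2)//3 and block j is sliced directly from its arithmetic start index 3*(j//2)+j%2, with no scan state at all.
import Mathlib
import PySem

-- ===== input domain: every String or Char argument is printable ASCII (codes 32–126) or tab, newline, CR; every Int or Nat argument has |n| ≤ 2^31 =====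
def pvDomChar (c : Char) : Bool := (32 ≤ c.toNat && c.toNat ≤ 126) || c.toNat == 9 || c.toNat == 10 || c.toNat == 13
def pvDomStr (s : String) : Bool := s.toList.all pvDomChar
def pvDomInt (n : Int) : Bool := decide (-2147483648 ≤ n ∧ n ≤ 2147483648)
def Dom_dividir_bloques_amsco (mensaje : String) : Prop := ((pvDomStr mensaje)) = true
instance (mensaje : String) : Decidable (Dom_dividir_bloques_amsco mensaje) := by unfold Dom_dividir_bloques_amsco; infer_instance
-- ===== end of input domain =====

-- B replaces A's stateful toggle/while scan by a closed-form index map: block count (2n+2)/3 and direct per-block slicing (alternative decomposition, same cost).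


-- ===== PORT A =====
-- while i < len(mensaje): append a block of size 1 or 2 according to the toggle 'alterna'
def pvGoA : List Char → Bool → List String
  | [], _ => []
  | c :: rest, alterna =>
    if alterna then
      String.mk [c] :: pvGoA rest false                        -- tamaño = 1
    else
      String.mk (c :: rest.take 1) :: pvGoA (rest.drop 1) true -- tamaño = 2 (slice may be short at the end)
termination_by l _ => l.length
decreasing_by all_goals (simp; try omega)

def dividir_bloques_amsco (mensaje : String) : List String :=
  pvGoA mensaje.toList true

-- ===== PORT B =====
-- block j = mensaje[3*(j//2)+j%2 : 3*(j//2)+j%2 + 1 + j%2]  (slice of a valid in-range window)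
def pvBlockB (l : List Char) (j : Nat) : String :=
  String.mk ((l.drop (3 * (j / 2) + j % 2)).take (1 + j % 2))

def dividir_bloques_amsco_alt (mensaje : String) : List String :=
  (List.range ((2 * mensaje.toList.length + 2) / 3)).map (pvBlockB mensaje.toList)

-- ===== PRECONDITION & SPEC =====
def Spec_dividir_bloques_amsco (mensaje : String) (out : List String) : Prop := out = dividir_bloques_amsco_alt mensaje
instance (mensaje : String) (out : List String) : Decidable (Spec_dividir_bloques_amsco mensaje out) := by unfold Spec_dividir_bloques_amsco; infer_instance

-- ===== CLAIM (what is proved, stated in full; the proofs are below) =====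
def Claim_equal_dividir_bloques_amsco : Prop := ∀ (mensaje : String), Dom_dividir_bloques_amsco mensaje → Spec_dividir_bloques_amsco mensaje (dividir_bloques_amsco mensaje)

-- ===== LEMMAS AND PROOFS =====
theorem pvBlockB_shift (c d : Char) (rest : List Char) (j : Nat) :
    pvBlockB (c :: d :: rest) (j + 2) = pvBlockB (rest.drop 1) j := by
  unfold pvBlockB
  rw [show 3 * ((j + 2) / 2) + (j + 2) % 2 = (3 * (j / 2) + j % 2) + 1 + 1 + 1 by omega,
      show (j + 2) % 2 = j % 2 by omega]
  have h2 : (c :: d :: rest).drop ((3 * (j / 2) + j % 2) + 1 + 1 + 1)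
      = (rest.drop 1).drop (3 * (j / 2) + j % 2) := by
    simp
  rw [h2]

theorem pvGoA_eq_map (n : Nat) : ∀ l : List Char, l.length ≤ n →
    pvGoA l true = (List.range ((2 * l.length + 2) / 3)).map (pvBlockB l) := by
  induction n with
  | zero =>
    intro l h
    have : l = [] := List.eq_nil_of_length_eq_zero (Nat.le_zero.mp h)
    simp [this, pvGoA]
  | succ n ih =>
    intro l h
    match l with
    | [] => simp [pvGoA]
    | [c] =>
      simp [pvGoA]
      simp [pvBlockB]
    | c :: d :: rest =>
      have hm : (2 * (c :: d :: rest).length + 2) / 3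
          = (2 * (rest.drop 1).length + 2) / 3 + 2 := by
        simp
        omega
      have hrange : List.range ((2 * (rest.drop 1).length + 2) / 3 + 2)
          = 0 :: 1 :: (List.range ((2 * (rest.drop 1).length + 2) / 3)).map (· + 2) := by
        rw [List.range_succ_eq_map, List.range_succ_eq_map]
        simp [Function.comp, List.map_map]
      have hlen : (rest.drop 1).length ≤ n := by simp at h ⊢; omega
      have hIH := ih (rest.drop 1) hlen
      simp only [pvGoA, if_true, Bool.false_eq_true, if_false, hm, hrange, List.map_cons,
        List.map_map, List.cons.injEq]
      refine ⟨?_, ?_, ?_⟩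
      · simp [pvBlockB]
      · simp [pvBlockB]
      · rw [hIH]
        apply List.map_congr_left
        intro j _
        exact (pvBlockB_shift c d rest j).symm

-- ===== VERDICT (by name: the statement is the Claim_ definition above) =====
theorem dividir_bloques_amsco_spec : Claim_equal_dividir_bloques_amsco := by
  intro mensaje _
  unfold Spec_dividir_bloques_amsco dividir_bloques_amsco dividir_bloques_amsco_alt
  exact pvGoA_eq_map mensaje.toList.length mensaje.toList le_rfl
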